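-- pv_equiv track=rewrite | github.com/gh0stintheshe11/LeetCode-Solutions | solutions/2832.maximal-range-that-each-element-is-maximum-in-it/Python3.py | maximumLengthOfRanges
-- ===== SOURCE A (Python) =====
-- from typing import List
--
-- def maximumLengthOfRanges(nums: List[int]) -> List[int]:
--     n = len(nums)
--     left_bound = [-1] * n
--     right_bound = [n] * n
--     stack = []
--
--     # Find left bounds
--     for i in range(n):
--         while stack and nums[stack[-1]] < nums[i]:
--             stack.pop()
--         if stack:
--             left_bound[i] = stack[-1]
--         stack.append(i)
--
--     stack = []
--
--     # Find right bounds
--     for i in range(n-1, -1, -1):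
--         while stack and nums[stack[-1]] < nums[i]:
--             stack.pop()
--         if stack:
--             right_bound[i] = stack[-1]
--         stack.append(i)
--
--     ans = [0] * n
--     for i in range(n):
--         ans[i] = right_bound[i] - left_bound[i] - 1
--
--     return ans
-- ===== SOURCE B (Python) =====
-- from typing import List
--
-- def maximumLengthOfRanges(nums: List[int]) -> List[int]:
--     n = len(nums)
--     ans = []
--     for i in range(n):
--         l = i - 1
--         while l >= 0 and nums[l] < nums[i]:
--             l -= 1
--         r = i + 1
--         while r < n and nums[r] < nums[i]:
--             r += 1
--         ans.append(r - l - 1)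
--     return ans
-- ===== Notes on version B (the rewrite author's own statement) =====
-- stated objective: simpler
-- what changed: Replaces the two monotonic-stack passes and three auxiliary arrays with a single pass that, for each index, scans left and right directly until the first element >= nums[i].
import Mathlib
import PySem

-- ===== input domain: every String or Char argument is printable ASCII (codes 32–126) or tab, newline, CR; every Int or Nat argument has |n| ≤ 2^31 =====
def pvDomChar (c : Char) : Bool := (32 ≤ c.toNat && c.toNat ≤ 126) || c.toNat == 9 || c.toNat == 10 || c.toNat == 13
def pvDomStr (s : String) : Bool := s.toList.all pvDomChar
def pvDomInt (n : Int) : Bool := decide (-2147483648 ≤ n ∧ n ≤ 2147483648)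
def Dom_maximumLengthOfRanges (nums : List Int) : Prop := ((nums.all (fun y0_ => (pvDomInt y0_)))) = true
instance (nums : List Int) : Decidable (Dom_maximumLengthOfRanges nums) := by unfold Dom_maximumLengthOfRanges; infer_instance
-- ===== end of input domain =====

-- B replaces the two monotonic-stack passes with a direct left/right scan from each index: simpler, no auxiliary arrays.

-- ===== PORT A =====
-- 'while stack and nums[stack[-1]] < nums[i]: stack.pop()'.  The stack holds list
-- indices (always in range), so reads use getD 0, which is exact here.
def pvPop (nums : List Int) (v : Int) : List Nat → List Nat
  | [] => []
  | t :: rest => if nums.getD t 0 < v then pvPop nums v rest else t :: rest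

-- body of 'for i in range(n)' (left-bound pass); state = (left_bound, stack)
def pvLeftStep (nums : List Int) (st : List Int × List Nat) (i : Nat) : List Int × List Nat :=
  let s := pvPop nums (nums.getD i 0) st.2
  match s with
  | [] => (st.1, i :: s)
  | t :: r => (st.1.set i (t : Int), i :: t :: r)

-- body of 'for i in range(n-1, -1, -1)' (right-bound pass); state = (right_bound, stack)
def pvRightStep (nums : List Int) (st : List Int × List Nat) (i : Nat) : List Int × List Nat :=
  let s := pvPop nums (nums.getD i 0) st.2
  match s with
  | [] => (st.1, i :: s)
  | t :: r => (st.1.set i (t : Int), i :: t :: r)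

def maximumLengthOfRanges (nums : List Int) : List Int :=
  let n := nums.length
  let lb := ((List.range n).foldl (pvLeftStep nums) (List.replicate n (-1), [])).1
  let rb := ((List.range n).reverse.foldl (pvRightStep nums) (List.replicate n (n : Int), [])).1
  (List.range n).foldl (fun ans i => ans.set i (rb.getD i 0 - lb.getD i 0 - 1)) (List.replicate n 0)

-- ===== PORT B =====
-- 'l = i - 1; while l >= 0 and nums[l] < nums[i]: l -= 1'; the Nat argument is l+1, 0 encodes l = -1
def pvScanL (nums : List Int) (v : Int) : Nat → Int
  | 0 => -1
  | k + 1 => if nums.getD k 0 < v then pvScanL nums v k else (k : Int)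

-- 'r = i + 1; while r < n and nums[r] < nums[i]: r += 1'
def pvScanR (nums : List Int) (v : Int) (r : Nat) : Int :=
  if r < nums.length then
    if nums.getD r 0 < v then pvScanR nums v (r + 1) else (r : Int)
  else (r : Int)
termination_by nums.length - r

def maximumLengthOfRanges_alt (nums : List Int) : List Int :=
  (List.range nums.length).map (fun i =>
    pvScanR nums (nums.getD i 0) (i + 1) - pvScanL nums (nums.getD i 0) i - 1)

-- ===== PRECONDITION & SPEC =====
def Spec_maximumLengthOfRanges (nums : List Int) (out : List Int) : Prop := out = maximumLengthOfRanges_alt nums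
instance (nums : List Int) (out : List Int) : Decidable (Spec_maximumLengthOfRanges nums out) := by unfold Spec_maximumLengthOfRanges; infer_instance

-- ===== CLAIM (what is proved, stated in full; the proofs are below) =====
def Claim_equal_maximumLengthOfRanges : Prop := ∀ (nums : List Int), Dom_maximumLengthOfRanges nums → Spec_maximumLengthOfRanges nums (maximumLengthOfRanges nums)

-- ===== LEMMAS AND PROOFS =====

-- characterisations of B's scans
theorem pvScanL_none (nums : List Int) (v : Int) (m : Nat)
    (h : ∀ k, k < m → nums.getD k 0 < v) : pvScanL nums v m = -1 := by
  induction m with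
  | zero => rfl
  | succ m ih =>
    simp only [pvScanL, if_pos (h m (Nat.lt_succ_self m))]
    exact ih (fun k hk => h k (Nat.lt_succ_of_lt hk))

theorem pvScanL_at (nums : List Int) (v : Int) (m t : Nat)
    (ht : t < m) (hv : ¬ nums.getD t 0 < v)
    (h : ∀ k, t < k → k < m → nums.getD k 0 < v) : pvScanL nums v m = (t : Int) := by
  induction m with
  | zero => omega
  | succ m ih =>
    rcases Nat.lt_succ_iff_lt_or_eq.mp ht with h' | h'
    · simp only [pvScanL, if_pos (h m (by omega) (Nat.lt_succ_self m))]
      exact ih h' (fun k hk1 hk2 => h k hk1 (Nat.lt_succ_of_lt hk2))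
    · subst h'; simp only [pvScanL, if_neg hv]

theorem pvScanR_none (nums : List Int) (v : Int) (r : Nat) (hr : r ≤ nums.length)
    (h : ∀ k, r ≤ k → k < nums.length → nums.getD k 0 < v) :
    pvScanR nums v r = (nums.length : Int) := by
  by_cases hlt : r < nums.length
  · rw [pvScanR, if_pos hlt, if_pos (h r le_rfl hlt)]
    exact pvScanR_none nums v (r + 1) hlt (fun k hk1 hk2 => h k (by omega) hk2)
  · have : r = nums.length := by omega
    rw [pvScanR, if_neg hlt, this]
termination_by nums.length - r

theorem pvScanR_at (nums : List Int) (v : Int) (r t : Nat)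
    (hr : r ≤ t) (ht : t < nums.length) (hv : ¬ nums.getD t 0 < v)
    (h : ∀ k, r ≤ k → k < t → nums.getD k 0 < v) : pvScanR nums v r = (t : Int) := by
  rcases Nat.lt_or_eq_of_le hr with h' | h'
  · rw [pvScanR, if_pos (by omega), if_pos (h r le_rfl h')]
    exact pvScanR_at nums v (r + 1) t h' ht hv (fun k hk1 hk2 => h k (by omega) hk2)
  · subst h'; rw [pvScanR, if_pos ht, if_neg hv]
termination_by t - r

-- the pop loop keeps exactly the stack entries with value ≥ v, and returns a suffix
theorem pvPop_spec (nums : List Int) (v : Int) (stack : List Nat)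
    (hpw : stack.Pairwise (fun a b => nums.getD a 0 ≤ nums.getD b 0)) :
    (∀ j, j ∈ pvPop nums v stack ↔ j ∈ stack ∧ v ≤ nums.getD j 0) ∧
    (pvPop nums v stack).Sublist stack := by
  induction stack with
  | nil => simp [pvPop]
  | cons t rest ih =>
    rcases List.pairwise_cons.mp hpw with ⟨hhead, htail⟩
    by_cases hlt : nums.getD t 0 < v
    · rw [pvPop, if_pos hlt]
      obtain ⟨hmem, hsub⟩ := ih htail
      refine ⟨fun j => ?_, hsub.trans (List.sublist_cons_self t rest)⟩
      rw [hmem j]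
      constructor
      · rintro ⟨hj, hv⟩; exact ⟨List.mem_cons_of_mem _ hj, hv⟩
      · rintro ⟨hj, hv⟩
        rcases List.mem_cons.mp hj with rfl | hj
        · omega
        · exact ⟨hj, hv⟩
    · rw [pvPop, if_neg hlt]
      refine ⟨fun j => ?_, List.Sublist.refl _⟩
      constructor
      · intro hj
        rcases List.mem_cons.mp hj with rfl | hj
        · exact ⟨List.mem_cons_self, by omega⟩
        · exact ⟨List.mem_cons_of_mem _ hj, le_trans (by omega) (hhead j hj)⟩
      · rintro ⟨hj, _⟩; exact hj

-- invariant of A's left-bound pass after processing indices 0..m-1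
def LInv (nums : List Int) (m : Nat) (st : List Int × List Nat) : Prop :=
  (∀ j ∈ st.2, j < m ∧ ∀ k, j < k → k < m → nums.getD k 0 ≤ nums.getD j 0) ∧
  (∀ j, j < m → (∀ k, j < k → k < m → nums.getD k 0 ≤ nums.getD j 0) → j ∈ st.2) ∧
  st.2.Pairwise (fun a b => b < a) ∧
  st.1.length = nums.length ∧
  (∀ i, i < m → st.1.getD i 0 = pvScanL nums (nums.getD i 0) i) ∧
  (∀ i, m ≤ i → i < nums.length → st.1.getD i 0 = -1)

theorem LInv_step (nums : List Int) (m : Nat) (st : List Int × List Nat)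
    (hm : m < nums.length) (hinv : LInv nums m st) :
    LInv nums (m + 1) (pvLeftStep nums st m) := by
  obtain ⟨h1, h2, h3, h4, h5, h6⟩ := hinv
  have hvp : st.2.Pairwise (fun a b => nums.getD a 0 ≤ nums.getD b 0) := by
    refine (List.Pairwise.and_mem.mp h3).imp ?_
    rintro a b ⟨ha, hb, hba⟩
    exact (h1 b hb).2 a hba (h1 a ha).1
  obtain ⟨hmem, hsub⟩ := pvPop_spec nums (nums.getD m 0) st.2 hvp
  have hgreat : ∀ k, k < m → nums.getD m 0 ≤ nums.getD k 0 →
      ∃ j ∈ pvPop nums (nums.getD m 0) st.2, k ≤ j := by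
    intro k hk2 hge
    set P := fun j => k ≤ j ∧ j < m ∧ nums.getD m 0 ≤ nums.getD j 0 with hP
    obtain ⟨hjk, hjm, hjv⟩ :=
      Nat.findGreatest_spec (P := P) (le_of_lt hk2) ⟨le_rfl, hk2, hge⟩
    refine ⟨Nat.findGreatest P m, (hmem _).mpr ⟨h2 _ hjm ?_, hjv⟩, hjk⟩
    intro k' hk'1 hk'2
    have hnp : ¬ P k' := Nat.findGreatest_is_greatest hk'1 (le_of_lt hk'2)
    by_contra hge'
    push Not at hge'
    exact hnp ⟨by omega, hk'2, le_trans hjv (le_of_lt hge')⟩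
  -- membership in the popped stack
  have hmem1 : ∀ j ∈ pvPop nums (nums.getD m 0) st.2,
      j < m ∧ nums.getD m 0 ≤ nums.getD j 0 ∧
        (∀ k, j < k → k < m → nums.getD k 0 ≤ nums.getD j 0) := by
    intro j hj
    obtain ⟨hj2, hjv⟩ := (hmem j).mp hj
    exact ⟨(h1 j hj2).1, hjv, (h1 j hj2).2⟩
  rcases hs : pvPop nums (nums.getD m 0) st.2 with _ | ⟨t, r⟩
  · -- stack emptied: every earlier value is < nums[m]
    have hall : ∀ k, k < m → nums.getD k 0 < nums.getD m 0 := by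
      intro k hk
      by_contra hge
      push Not at hge
      obtain ⟨j, hj, -⟩ := hgreat k hk hge
      rw [hs] at hj
      exact absurd hj (List.not_mem_nil)
    unfold LInv pvLeftStep
    simp only [hs]
    refine ⟨?_, ?_, ?_, h4, ?_, ?_⟩
    · intro j hj
      rcases List.mem_cons.mp hj with rfl | hj
      · exact ⟨by omega, fun k hk1 hk2 => by omega⟩
      · exact absurd hj (List.not_mem_nil)
    · intro j hjm hcond
      rcases Nat.lt_succ_iff_lt_or_eq.mp hjm with hjm | rfl
      · exact absurd (hcond m hjm (by omega)) (by have := hall j hjm; omega)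
      · exact List.mem_cons_self
    · exact List.pairwise_cons.mpr ⟨fun j hj => absurd hj (List.not_mem_nil), List.Pairwise.nil⟩
    · intro i hi
      rcases Nat.lt_succ_iff_lt_or_eq.mp hi with hi | rfl
      · exact h5 i hi
      · rw [h6 i le_rfl (by omega), pvScanL_none nums _ i hall]
    · intro i hi hilen
      exact h6 i (by omega) hilen
  · -- new top t = nearest j < m with nums[j] ≥ nums[m]
    have htmem : t ∈ pvPop nums (nums.getD m 0) st.2 := by rw [hs]; exact List.mem_cons_self
    obtain ⟨htm, htv, htdom⟩ := hmem1 t htmem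
    have hpwpop : (t :: r).Pairwise (fun a b : Nat => b < a) := hs ▸ h3.sublist hsub
    have htop : ∀ j ∈ pvPop nums (nums.getD m 0) st.2, j ≤ t := by
      intro j hj
      rw [hs] at hj
      rcases List.mem_cons.mp hj with rfl | hj
      · exact le_rfl
      · exact le_of_lt ((List.pairwise_cons.mp hpwpop).1 j hj)
    have hbetween : ∀ k, t < k → k < m → nums.getD k 0 < nums.getD m 0 := by
      intro k hk1 hk2
      by_contra hge
      push Not at hge
      obtain ⟨j, hj, hkj⟩ := hgreat k hk2 hge
      have := htop j hj
      omega
    unfold LInv pvLeftStep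
    simp only [hs]
    refine ⟨?_, ?_, ?_, ?_, ?_, ?_⟩
    · intro j hj
      rcases List.mem_cons.mp hj with rfl | hj
      · exact ⟨by omega, fun k hk1 hk2 => by omega⟩
      · obtain ⟨hjm, hjv, hjdom⟩ := hmem1 j (hs ▸ hj)
        refine ⟨by omega, fun k hk1 hk2 => ?_⟩
        rcases Nat.lt_succ_iff_lt_or_eq.mp hk2 with hk2 | rfl
        · exact hjdom k hk1 hk2
        · exact hjv
    · intro j hjm hcond
      rcases Nat.lt_succ_iff_lt_or_eq.mp hjm with hjm | rfl
      · refine List.mem_cons_of_mem _ (hs ▸ (hmem j).mpr ⟨?_, ?_⟩)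
        · exact h2 j hjm (fun k hk1 hk2 => hcond k hk1 (by omega))
        · exact hcond m hjm (by omega)
      · exact List.mem_cons_self
    · refine List.pairwise_cons.mpr ⟨?_, hpwpop⟩
      intro j hj
      have := hmem1 j (hs ▸ hj)
      omega
    · simpa using h4
    · intro i hi
      rcases Nat.lt_succ_iff_lt_or_eq.mp hi with hi | rfl
      · rw [List.getD_eq_getElem?_getD, List.getElem?_set_ne (by omega),
          ← List.getD_eq_getElem?_getD]
        exact h5 i hi
      · rw [List.getD_eq_getElem?_getD, List.getElem?_set_self (by omega : i < st.1.length)]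
        simp only [Option.getD_some]
        exact (pvScanL_at nums _ i t htm (by omega) hbetween).symm
    · intro i hi hilen
      rw [List.getD_eq_getElem?_getD, List.getElem?_set_ne (by omega),
        ← List.getD_eq_getElem?_getD]
      exact h6 i (by omega) hilen

theorem LInv_fold (nums : List Int) (m : Nat) (hm : m ≤ nums.length) :
    LInv nums m ((List.range m).foldl (pvLeftStep nums)
      (List.replicate nums.length (-1), [])) := by
  induction m with
  | zero =>
    refine ⟨by simp, by omega, by simp, by simp, by omega, ?_⟩
    intro i _ hi
    simp [List.getD_eq_getElem?_getD, hi]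
  | succ m ih =>
    rw [List.range_succ, List.foldl_append, List.foldl_cons, List.foldl_nil]
    exact LInv_step nums m _ (by omega) (ih (by omega))

-- invariant of A's right-bound pass after processing indices n-1..m
def RInv (nums : List Int) (m : Nat) (st : List Int × List Nat) : Prop :=
  (∀ j ∈ st.2, m ≤ j ∧ j < nums.length ∧
    ∀ k, m ≤ k → k < j → nums.getD k 0 ≤ nums.getD j 0) ∧
  (∀ j, m ≤ j → j < nums.length →
    (∀ k, m ≤ k → k < j → nums.getD k 0 ≤ nums.getD j 0) → j ∈ st.2) ∧
  st.2.Pairwise (fun a b => a < b) ∧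
  st.1.length = nums.length ∧
  (∀ i, m ≤ i → i < nums.length →
    st.1.getD i 0 = pvScanR nums (nums.getD i 0) (i + 1)) ∧
  (∀ i, i < m → st.1.getD i 0 = (nums.length : Int))

theorem RInv_step (nums : List Int) (m : Nat) (st : List Int × List Nat)
    (hm : m < nums.length) (hinv : RInv nums (m + 1) st) :
    RInv nums m (pvRightStep nums st m) := by
  obtain ⟨h1, h2, h3, h4, h5, h6⟩ := hinv
  have hvp : st.2.Pairwise (fun a b => nums.getD a 0 ≤ nums.getD b 0) := by
    refine (List.Pairwise.and_mem.mp h3).imp ?_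
    rintro a b ⟨ha, hb, hab⟩
    exact (h1 b hb).2.2 a (h1 a ha).1 hab
  obtain ⟨hmem, hsub⟩ := pvPop_spec nums (nums.getD m 0) st.2 hvp
  have hleast : ∀ k, m + 1 ≤ k → k < nums.length → nums.getD m 0 ≤ nums.getD k 0 →
      ∃ j ∈ pvPop nums (nums.getD m 0) st.2, j ≤ k := by
    intro k hk1 hk2 hge
    have hex : ∃ j, m + 1 ≤ j ∧ j ≤ k ∧ nums.getD m 0 ≤ nums.getD j 0 := ⟨k, hk1, le_rfl, hge⟩
    obtain ⟨hj1, hj2, hjv⟩ := Nat.find_spec hex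
    refine ⟨Nat.find hex, (hmem _).mpr ⟨h2 _ hj1 (by omega) ?_, hjv⟩, hj2⟩
    intro k' hk'1 hk'2
    have hnp := Nat.find_min hex hk'2
    push Not at hnp
    exact le_trans (le_of_lt (hnp hk'1 (by omega))) hjv
  have hmem1 : ∀ j ∈ pvPop nums (nums.getD m 0) st.2,
      m + 1 ≤ j ∧ j < nums.length ∧ nums.getD m 0 ≤ nums.getD j 0 ∧
        (∀ k, m + 1 ≤ k → k < j → nums.getD k 0 ≤ nums.getD j 0) := by
    intro j hj
    obtain ⟨hj2, hjv⟩ := (hmem j).mp hj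
    exact ⟨(h1 j hj2).1, (h1 j hj2).2.1, hjv, (h1 j hj2).2.2⟩
  rcases hs : pvPop nums (nums.getD m 0) st.2 with _ | ⟨t, r⟩
  · have hall : ∀ k, m + 1 ≤ k → k < nums.length → nums.getD k 0 < nums.getD m 0 := by
      intro k hk1 hk2
      by_contra hge
      push Not at hge
      obtain ⟨j, hj, -⟩ := hleast k hk1 hk2 hge
      rw [hs] at hj
      exact absurd hj (List.not_mem_nil)
    unfold RInv pvRightStep
    simp only [hs]
    refine ⟨?_, ?_, ?_, h4, ?_, ?_⟩
    · intro j hj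
      rcases List.mem_cons.mp hj with rfl | hj
      · exact ⟨le_rfl, hm, fun k hk1 hk2 => by omega⟩
      · exact absurd hj (List.not_mem_nil)
    · intro j hjm hjn hcond
      rcases Nat.lt_or_ge m j with hjm' | hjm'
      · exact absurd (hcond m le_rfl hjm') (by have := hall j (by omega) hjn; omega)
      · have : j = m := by omega
        subst this
        exact List.mem_cons_self
    · exact List.pairwise_cons.mpr ⟨fun j hj => absurd hj (List.not_mem_nil), List.Pairwise.nil⟩
    · intro i hi hin
      rcases Nat.lt_or_ge m i with hi' | hi'
      · exact h5 i (by omega) hin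
      · have : i = m := by omega
        subst this
        rw [h6 i (by omega), pvScanR_none nums _ (i + 1) (by omega)
          (fun k hk1 hk2 => hall k hk1 hk2)]
    · intro i hi
      exact h6 i (by omega)
  · have htmem : t ∈ pvPop nums (nums.getD m 0) st.2 := by rw [hs]; exact List.mem_cons_self
    obtain ⟨htm, htn, htv, htdom⟩ := hmem1 t htmem
    have hpwpop : (t :: r).Pairwise (fun a b : Nat => a < b) := hs ▸ h3.sublist hsub
    have htop : ∀ j ∈ pvPop nums (nums.getD m 0) st.2, t ≤ j := by
      intro j hj
      rw [hs] at hj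
      rcases List.mem_cons.mp hj with rfl | hj
      · exact le_rfl
      · exact le_of_lt ((List.pairwise_cons.mp hpwpop).1 j hj)
    have hbetween : ∀ k, m + 1 ≤ k → k < t → nums.getD k 0 < nums.getD m 0 := by
      intro k hk1 hk2
      by_contra hge
      push Not at hge
      obtain ⟨j, hj, hjk⟩ := hleast k hk1 (by omega) hge
      have := htop j hj
      omega
    unfold RInv pvRightStep
    simp only [hs]
    refine ⟨?_, ?_, ?_, ?_, ?_, ?_⟩
    · intro j hj
      rcases List.mem_cons.mp hj with rfl | hj
      · exact ⟨le_rfl, hm, fun k hk1 hk2 => by omega⟩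
      · obtain ⟨hjm, hjn, hjv, hjdom⟩ := hmem1 j (hs ▸ hj)
        refine ⟨by omega, hjn, fun k hk1 hk2 => ?_⟩
        rcases Nat.lt_or_ge m k with hk' | hk'
        · exact hjdom k (by omega) hk2
        · have : k = m := by omega
          subst this
          exact hjv
    · intro j hjm hjn hcond
      rcases Nat.lt_or_ge m j with hjm' | hjm'
      · refine List.mem_cons_of_mem _ (hs ▸ (hmem j).mpr ⟨?_, ?_⟩)
        · exact h2 j (by omega) hjn (fun k hk1 hk2 => hcond k (by omega) hk2)
        · exact hcond m le_rfl hjm'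
      · have : j = m := by omega
        subst this
        exact List.mem_cons_self
    · refine List.pairwise_cons.mpr ⟨?_, hpwpop⟩
      intro j hj
      have := hmem1 j (hs ▸ hj)
      omega
    · simpa using h4
    · intro i hi hin
      rcases Nat.lt_or_ge m i with hi' | hi'
      · rw [List.getD_eq_getElem?_getD, List.getElem?_set_ne (by omega),
          ← List.getD_eq_getElem?_getD]
        exact h5 i (by omega) hin
      · have : i = m := by omega
        subst this
        rw [List.getD_eq_getElem?_getD, List.getElem?_set_self (by omega : i < st.1.length)]
        simp only [Option.getD_some]
        exact (pvScanR_at nums _ (i + 1) t htm htn (by omega) hbetween).symm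
    · intro i hi
      rw [List.getD_eq_getElem?_getD, List.getElem?_set_ne (by omega),
        ← List.getD_eq_getElem?_getD]
      exact h6 i (by omega)

theorem RInv_fold (nums : List Int) (d m : Nat) (hd : m + d = nums.length) :
    RInv nums m (((List.range' m d).reverse).foldl (pvRightStep nums)
      (List.replicate nums.length ((nums.length : Nat) : Int), [])) := by
  induction d generalizing m with
  | zero =>
    refine ⟨by simp, by omega, by simp, by simp, by omega, ?_⟩
    intro i hi
    simp [List.getD_eq_getElem?_getD, show i < nums.length by omega]
  | succ d ih =>
    rw [List.range'_succ, List.reverse_cons, List.foldl_append, List.foldl_cons, List.foldl_nil]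
    exact RInv_step nums m _ (by omega) (ih (m + 1) (by omega))

-- the final 'for i in range(n): ans[i] = …' loop writes f i at slot i
theorem foldl_set_getD (f : Nat → Int) (n : Nat) (init : List Int) :
    ((List.range n).foldl (fun l i => l.set i (f i)) init).length = init.length ∧
    (∀ j, j < n → j < init.length →
      ((List.range n).foldl (fun l i => l.set i (f i)) init).getD j 0 = f j) := by
  induction n with
  | zero => exact ⟨rfl, by omega⟩
  | succ n ih =>
    rw [List.range_succ, List.foldl_append, List.foldl_cons, List.foldl_nil]
    obtain ⟨ihlen, ihval⟩ := ih
    refine ⟨by simpa using ihlen, ?_⟩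
    intro j hj hjlen
    rcases Nat.lt_succ_iff_lt_or_eq.mp hj with hj' | rfl
    · rw [List.getD_eq_getElem?_getD, List.getElem?_set_ne (by omega),
        ← List.getD_eq_getElem?_getD]
      exact ihval j hj' hjlen
    · rw [List.getD_eq_getElem?_getD, List.getElem?_set_self (by omega : j < _), Option.getD_some]

-- glue: a left/right-bound pair with the scan values gives exactly B's list
theorem pv_assemble (nums lb rb : List Int)
    (hlb : ∀ i, i < nums.length → lb.getD i 0 = pvScanL nums (nums.getD i 0) i)
    (hrb : ∀ i, i < nums.length → rb.getD i 0 = pvScanR nums (nums.getD i 0) (i + 1)) :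
    (List.range nums.length).foldl
        (fun ans i => ans.set i (rb.getD i 0 - lb.getD i 0 - 1))
        (List.replicate nums.length 0) = maximumLengthOfRanges_alt nums := by
  obtain ⟨hlen, hval⟩ :=
    foldl_set_getD (fun i => rb.getD i 0 - lb.getD i 0 - 1) nums.length
      (List.replicate nums.length 0)
  apply List.ext_getElem
  · rw [hlen, List.length_replicate]
    simp [maximumLengthOfRanges_alt]
  · intro i hi1 hi2
    have hi : i < nums.length := by
      have := hi1
      rw [hlen, List.length_replicate] at this
      exact this
    rw [← List.getD_eq_getElem _ 0 hi1]
    rw [hval i hi (by simpa using hi)]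
    simp only [maximumLengthOfRanges_alt, List.getElem_map, List.getElem_range]
    rw [hlb i hi, hrb i hi]

theorem ports_eq (nums : List Int) :
    maximumLengthOfRanges nums = maximumLengthOfRanges_alt nums := by
  obtain ⟨-, -, -, -, hlb, -⟩ := LInv_fold nums nums.length le_rfl
  have hrfold := RInv_fold nums nums.length 0 (by omega)
  rw [← List.range_eq_range'] at hrfold
  obtain ⟨-, -, -, -, hrb, -⟩ := hrfold
  simp only [maximumLengthOfRanges]
  exact pv_assemble nums _ _ hlb (fun i hi => hrb i (by omega) hi)

-- ===== VERDICT (by name: the statement is the Claim_ definition above) =====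
theorem maximumLengthOfRanges_spec : Claim_equal_maximumLengthOfRanges := by
  intro nums _
  exact ports_eq nums
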